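-- pv_equiv track=rewrite | github.com/Daehyun-Bae/AlgoStudy | BaekJoon/bj_1309.py | solution
-- ===== SOURCE A (Python) =====
-- def solution(n):
--     memo = [3, 7]
--     if n < 3:
--         return memo[n-1]
--     for i in range(n-2):
--         memo.append(memo[-1] * 2 + memo[-2])
--         del memo[0]
--     return memo[-1] % 9901
-- ===== SOURCE B (Python) =====
-- MOD = 9901
--
-- def _mat_mul(X, Y):
--     (a, b), (c, d) = X
--     (e, f), (g, h) = Y
--     return (((a * e + b * g) % MOD, (a * f + b * h) % MOD),
--             ((c * e + d * g) % MOD, (c * f + d * h) % MOD))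
--
-- def solution(n):
--     if n < 3:
--         return [3, 7][n - 1]
--     R = ((1, 0), (0, 1))
--     M = ((2, 1), (1, 0))
--     e = n - 2
--     while e > 0:
--         if e & 1:
--             R = _mat_mul(R, M)
--         M = _mat_mul(M, M)
--         e >>= 1
--     (a, b), _ = R
--     return (a * 7 + b * 3) % MOD
-- ===== Notes on version B (the rewrite author's own statement) =====
-- stated objective: faster
-- what changed: Replaces A's n-2-step loop on ever-growing big integers (mod taken only once at the end) with 2x2 matrix fast exponentiation mod 9901, computing the same recurrence term in O(log n) constant-size multiplications.
import Mathlib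
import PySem

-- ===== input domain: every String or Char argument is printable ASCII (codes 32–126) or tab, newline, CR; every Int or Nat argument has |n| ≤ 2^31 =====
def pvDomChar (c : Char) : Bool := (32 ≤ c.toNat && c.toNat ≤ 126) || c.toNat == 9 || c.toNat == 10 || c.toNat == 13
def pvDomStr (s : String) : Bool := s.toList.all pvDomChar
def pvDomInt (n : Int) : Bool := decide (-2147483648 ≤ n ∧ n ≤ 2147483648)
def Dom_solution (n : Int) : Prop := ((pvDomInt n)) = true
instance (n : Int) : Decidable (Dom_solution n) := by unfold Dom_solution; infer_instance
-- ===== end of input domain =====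

-- B replaces A's O(n)-step big-integer recurrence loop with 2×2 matrix exponentiation mod 9901 (O(log n) multiplications); return values agree on every n ≥ -1 (A raises IndexError for n ≤ -2).

-- ===== PORT A =====
-- loop body: memo.append(memo[-1] * 2 + memo[-2]); del memo[0]  (del memo[0] = drop 1;
-- memo[-1]/memo[-2] via pyGetD, always in range since memo keeps exactly 2 elements)
def aStep (memo : List Int) : List Int :=
  (memo ++ [PySem.List.pyGetD memo (-1) 0 * 2 + PySem.List.pyGetD memo (-2) 0]).drop 1

def solution (n : Int) : Int :=
  if n < 3 then PySem.List.pyGetD [3, 7] (n - 1) 0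
  else
    PySem.Int.mod
      (PySem.List.pyGetD
        ((PySem.List.pyRange 0 (n - 2) 1).foldl (fun memo _ => aStep memo) [3, 7]) (-1) 0)
      9901

-- ===== PORT B =====
abbrev PVM2 := (Int × Int) × (Int × Int)

-- _mat_mul: 2×2 matrix product with every entry reduced % 9901
def matMul (X Y : PVM2) : PVM2 :=
  ((PySem.Int.mod (X.1.1 * Y.1.1 + X.1.2 * Y.2.1) 9901,
    PySem.Int.mod (X.1.1 * Y.1.2 + X.1.2 * Y.2.2) 9901),
   (PySem.Int.mod (X.2.1 * Y.1.1 + X.2.2 * Y.2.1) 9901,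
    PySem.Int.mod (X.2.1 * Y.1.2 + X.2.2 * Y.2.2) 9901))

-- the while-loop of Source B: e > 0 counter held as Nat (e & 1 = e % 2, e >>= 1 = e / 2 on Nat)
def powLoop (R M : PVM2) (e : Nat) : PVM2 :=
  if e = 0 then R
  else powLoop (if e % 2 = 1 then matMul R M else R) (matMul M M) (e / 2)
termination_by e
decreasing_by omega

def solution_alt (n : Int) : Int :=
  if n < 3 then PySem.List.pyGetD [3, 7] (n - 1) 0
  else
    let R := powLoop ((1, 0), (0, 1)) ((2, 1), (1, 0)) (n - 2).toNat
    PySem.Int.mod (R.1.1 * 7 + R.1.2 * 3) 9901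

-- ===== PRECONDITION & SPEC =====
-- Pre_ excludes exactly n ≤ -2, where A's memo[n-1] raises IndexError (B's [3,7][n-1] raises there too).
def Pre_solution (n : Int) : Prop := -1 ≤ n
instance (n : Int) : Decidable (Pre_solution n) := by unfold Pre_solution; infer_instance
def pvWitness_solution : Int := 5

def Spec_solution (n : Int) (out : Int) : Prop := out = solution_alt n
instance (n : Int) (out : Int) : Decidable (Spec_solution n out) := by unfold Spec_solution; infer_instance

-- ===== CLAIM (what is proved, stated in full; the proofs are below) =====
def Claim_equal_solution : Prop := ∀ (n : Int), Dom_solution n → Pre_solution n → Spec_solution n (solution n)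

-- ===== LEMMAS AND PROOFS =====
-- the recurrence: g k = A's memo head after k loop iterations (g 0 = 3, g 1 = 7)
def g : Nat → Int
  | 0 => 3
  | 1 => 7
  | (k+2) => 2 * g (k+1) + g k

theorem aStep_pair (x y : Int) : aStep [x, y] = [y, y * 2 + x] := by
  simp [aStep, pysem]

theorem foldl_aStep_iterate (l : List Int) (init : List Int) :
    l.foldl (fun memo _ => aStep memo) init = aStep^[l.length] init := by
  induction l generalizing init with
  | nil => rfl
  | cons x xs ih => simp [List.foldl_cons, ih, Function.iterate_succ_apply]

theorem iterate_aStep_g (k : Nat) : aStep^[k] [3, 7] = [g k, g (k+1)] := by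
  induction k with
  | zero => simp [g]
  | succ k ih =>
      rw [Function.iterate_succ_apply', ih, aStep_pair]
      have : g (k + 1) * 2 + g k = g (k + 2) := by simp [g]; ring
      rw [this]

theorem solution_eq (n : Int) (h : 3 ≤ n) :
    solution n = g ((n - 2).toNat + 1) % 9901 := by
  unfold solution
  rw [if_neg (by omega), PySem.Int.mod_eq_emod_of_pos (by norm_num),
    foldl_aStep_iterate]
  simp only [PySem.List.length_pyRange_one, sub_zero]
  rw [iterate_aStep_g]
  simp [pysem]

-- B side: push everything into Matrix (Fin 2) (Fin 2) (ZMod 9901)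
abbrev Zm := ZMod 9901

def phi (X : PVM2) : Matrix (Fin 2) (Fin 2) Zm :=
  !![(X.1.1 : Zm), (X.1.2 : Zm); (X.2.1 : Zm), (X.2.2 : Zm)]

theorem cast_pymod (a : Int) : ((PySem.Int.mod a 9901 : Int) : Zm) = (a : Zm) := by
  rw [PySem.Int.mod_eq_emod_of_pos (by norm_num)]
  have := ZMod.intCast_mod a 9901
  push_cast at this ⊢
  exact this

theorem emod_eq_of_cast_eq {x y : Int} (h : (x : Zm) = (y : Zm)) :
    x % 9901 = y % 9901 := by
  rw [ZMod.intCast_eq_intCast_iff'] at h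
  exact_mod_cast h

theorem phi_mul (X Y : PVM2) : phi (matMul X Y) = phi X * phi Y := by
  obtain ⟨⟨a, b⟩, c, d⟩ := X
  obtain ⟨⟨e, f, g'⟩, h⟩ := (⟨⟨Y.1.1, Y.1.2, Y.2.1⟩, Y.2.2⟩ : (Int × Int × Int) × Int)
  simp only [phi, matMul, Matrix.mul_fin_two, cast_pymod]
  push_cast
  rfl

theorem powLoop_phi (e : Nat) : ∀ R M : PVM2, phi (powLoop R M e) = phi R * phi M ^ e := by
  induction e using Nat.strong_induction_on with
  | _ e ih =>
    intro R M
    rw [powLoop]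
    by_cases h0 : e = 0
    · simp [h0]
    · rw [if_neg h0, ih (e / 2) (by omega), phi_mul]
      have hsq : (phi M * phi M) ^ (e / 2) = phi M ^ (2 * (e / 2)) := by
        rw [← sq, ← pow_mul]
      by_cases h2 : e % 2 = 1
      · rw [if_pos h2, phi_mul, hsq, mul_assoc]
        have : phi M * phi M ^ (2 * (e / 2)) = phi M ^ e := by
          rw [← pow_succ']
          congr 1
          omega
        rw [this]
      · have he : 2 * (e / 2) = e := by omega
        rw [if_neg h2, hsq, he]

def Mv : Matrix (Fin 2) (Fin 2) Zm := !![2, 1; 1, 0]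
def Vv : Matrix (Fin 2) (Fin 2) Zm := !![7, 0; 3, 0]

theorem pow_Mv_Vv (e : Nat) : Mv ^ e * Vv = !![(g (e+1) : Zm), 0; (g e : Zm), 0] := by
  induction e with
  | zero => simp [Vv, g]
  | succ e ih =>
      rw [pow_succ', mul_assoc, ih]
      show (!![2, 1; 1, 0] : Matrix (Fin 2) (Fin 2) Zm) * _ = _
      rw [Matrix.mul_fin_two]
      have h2 : (g (e + 2) : Zm) = 2 * (g (e + 1) : Zm) + (g e : Zm) := by
        simp [g]
      ext i j
      fin_cases i <;> fin_cases j <;> simp [h2]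

theorem solution_alt_eq (n : Int) (h : 3 ≤ n) :
    solution_alt n = g ((n - 2).toNat + 1) % 9901 := by
  unfold solution_alt
  rw [if_neg (by omega)]
  set K := (n - 2).toNat with hK
  set R := powLoop ((1, 0), (0, 1)) ((2, 1), (1, 0)) K with hR
  have hphi : phi R = Mv ^ K := by
    rw [hR, powLoop_phi]
    have h1 : phi ((1, 0), (0, 1)) = 1 := by
      simp [phi, Matrix.one_fin_two]
    have h2 : phi ((2, 1), (1, 0)) = Mv := by
      simp [phi, Mv]
    rw [h1, h2, one_mul]
  have e00 : (Mv ^ K) 0 0 = (R.1.1 : Zm) := by rw [← hphi]; simp [phi]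
  have e01 : (Mv ^ K) 0 1 = (R.1.2 : Zm) := by rw [← hphi]; simp [phi]
  have hval : ((R.1.1 * 7 + R.1.2 * 3 : Int) : Zm) = (g (K + 1) : Zm) := by
    have hmul := pow_Mv_Vv K
    have : (Mv ^ K * Vv) 0 0 = (g (K + 1) : Zm) := by rw [hmul]; simp
    rw [Matrix.mul_apply, Fin.sum_univ_two, e00, e01] at this
    norm_num [Vv] at this
    push_cast
    rw [← this]
  rw [PySem.Int.mod_eq_emod_of_pos (by norm_num)]
  exact emod_eq_of_cast_eq hval

-- ===== VERDICT (by name: the statement is the Claim_ definition above) =====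
theorem solution_spec : Claim_equal_solution := by
  intro n _ hpre
  unfold Spec_solution
  by_cases h3 : n < 3
  · unfold solution solution_alt
    rw [if_pos h3, if_pos h3]
  · rw [solution_eq n (by omega), solution_alt_eq n (by omega)]
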